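-- pv_equiv track=rewrite | github.com/BIRD-Laboratories/MLPScaling | create_experiments.py | estimate_vram
-- ===== SOURCE A (Python) =====
-- def estimate_vram(layer_count, width, input_size, output_size):
--     param_count = 0
--     for i in range(layer_count):
--         if i == 0:
--             param_count += (input_size * width) + width
--         else:
--             param_count += (width * width) + width
--     param_count += (width * output_size) + output_size
--
--     vram_usage = param_count * 4 + input_size * 4
--
--     return vram_usage, param_count
-- ===== SOURCE B (Python) =====
-- def estimate_vram(layer_count, width, input_size, output_size):
--     hidden = max(layer_count - 1, 0)
--     first = input_size * width + width if layer_count >= 1 else 0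
--     param_count = first + hidden * (width * width + width) + width * output_size + output_size
--     return param_count * 4 + input_size * 4, param_count
-- ===== Notes on version B (the rewrite author's own statement) =====
-- stated objective: faster
-- what changed: replaced the O(layer_count) accumulation loop with a closed-form formula: first-layer term (if layer_count >= 1) + max(layer_count-1,0) hidden-layer terms + output term
import Mathlib
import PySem

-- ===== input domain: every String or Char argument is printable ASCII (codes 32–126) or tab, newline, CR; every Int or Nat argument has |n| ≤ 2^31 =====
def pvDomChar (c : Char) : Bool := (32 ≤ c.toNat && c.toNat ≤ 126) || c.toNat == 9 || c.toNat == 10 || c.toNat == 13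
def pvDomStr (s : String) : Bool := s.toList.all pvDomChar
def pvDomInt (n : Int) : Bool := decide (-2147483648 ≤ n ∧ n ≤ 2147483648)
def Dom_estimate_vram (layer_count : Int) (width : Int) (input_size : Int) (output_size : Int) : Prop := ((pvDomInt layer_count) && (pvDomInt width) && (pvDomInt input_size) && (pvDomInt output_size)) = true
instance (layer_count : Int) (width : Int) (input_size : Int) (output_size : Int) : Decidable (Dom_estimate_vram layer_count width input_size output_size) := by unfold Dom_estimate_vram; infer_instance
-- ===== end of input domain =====

-- B replaces A's per-layer accumulation loop with closed-form O(1) arithmetic (objective: faster).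

-- ===== PORT A =====
def estimate_vram (layer_count : Int) (width : Int) (input_size : Int) (output_size : Int) : List Int :=
  let param_count : Int := 0
  let param_count :=
    (PySem.List.pyRange 0 layer_count 1).foldl
      (fun acc i =>
        if i = 0 then acc + ((input_size * width) + width)
        else acc + ((width * width) + width)) param_count
  let param_count := param_count + ((width * output_size) + output_size)
  let vram_usage := param_count * 4 + input_size * 4
  [vram_usage, param_count]

-- ===== PORT B =====
def estimate_vram_alt (layer_count : Int) (width : Int) (input_size : Int) (output_size : Int) : List Int :=
  let hidden : Int := max (layer_count - 1) 0
  let first : Int := if 1 ≤ layer_count then input_size * width + width else 0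
  let param_count := first + hidden * (width * width + width) + width * output_size + output_size
  [param_count * 4 + input_size * 4, param_count]

-- ===== PRECONDITION & SPEC =====
def Spec_estimate_vram (layer_count : Int) (width : Int) (input_size : Int) (output_size : Int) (out : List Int) : Prop := out = estimate_vram_alt layer_count width input_size output_size
instance (layer_count : Int) (width : Int) (input_size : Int) (output_size : Int) (out : List Int) : Decidable (Spec_estimate_vram layer_count width input_size output_size out) := by unfold Spec_estimate_vram; infer_instance

-- ===== CLAIM (what is proved, stated in full; the proofs are below) =====
def Claim_equal_estimate_vram : Prop := ∀ (layer_count : Int) (width : Int) (input_size : Int) (output_size : Int), Dom_estimate_vram layer_count width input_size output_size → Spec_estimate_vram layer_count width input_size output_size (estimate_vram layer_count width input_size output_size)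

-- ===== LEMMAS AND PROOFS =====

-- A fold that adds c for every element of a list free of 0 adds length * c.
theorem foldl_const_add (u c : Int) (l : List Int) (h : ∀ x ∈ l, x ≠ 0) (a : Int) :
    l.foldl (fun acc i => if i = 0 then acc + u else acc + c) a = a + l.length * c := by
  induction l generalizing a with
  | nil => simp
  | cons x xs ih =>
    have hx : x ≠ 0 := h x (List.mem_cons_self)
    simp only [List.foldl_cons, if_neg hx, List.length_cons]
    rw [ih (fun y hy => h y (List.mem_cons_of_mem _ hy))]
    push_cast
    ring

theorem estimate_vram_eq_alt (layer_count width input_size output_size : Int) :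
    estimate_vram layer_count width input_size output_size
      = estimate_vram_alt layer_count width input_size output_size := by
  unfold estimate_vram estimate_vram_alt
  by_cases hlc : 1 ≤ layer_count
  · rw [PySem.List.pyRange_one_cons (by omega : (0:Int) < layer_count)]
    simp only [List.foldl_cons]
    rw [foldl_const_add _ _ _
        (fun x hx => by
          have := (PySem.List.mem_pyRange_one).mp hx
          omega)]
    rw [PySem.List.length_pyRange_one,
        show ((layer_count - (0 + 1)).toNat : Int) = layer_count - 1 by omega,
        show max (layer_count - 1) 0 = layer_count - 1 by omega]
    simp only [if_true, if_pos hlc]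
    ring_nf
  · rw [PySem.List.pyRange_one_eq_nil (by omega : layer_count ≤ 0)]
    have : max (layer_count - 1) 0 = 0 := by omega
    simp only [List.foldl_nil, this, if_neg hlc]
    ring_nf

-- ===== VERDICT (by name: the statement is the Claim_ definition above) =====
theorem estimate_vram_spec : Claim_equal_estimate_vram := by
  intro lc w i o _
  exact estimate_vram_eq_alt lc w i o
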